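-- pv_equiv track=rewrite | github.com/yennanliu/CS_basics | leetcode_python/Array/sort-array-by-parity-ii.py | sortArrayByParityII
-- ===== SOURCE A (Python) =====
-- def sortArrayByParityII(A):
--     """
--     :type A: List[int]
--     :rtype: List[int]
--     """
--     N = len(A)
--     res = [0] * N
--     even, odd = 0, 1
--     for a in A:
--         if a % 2 == 1:
--             res[odd] = a
--             odd += 2
--         else:
--             res[even] = a
--             even += 2
--     return res
-- ===== SOURCE B (Python) =====
-- def sortArrayByParityII(A):
--     evens = [x for x in A if x % 2 == 0]
--     odds = [x for x in A if x % 2 == 1]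
--     return [evens[i // 2] if i % 2 == 0 else odds[i // 2] for i in range(len(A))]
-- ===== Notes on version B (the rewrite author's own statement) =====
-- stated objective: simpler
-- what changed: B partitions the list into evens and odds with two filter passes and builds the result in one comprehension indexing evens[i//2]/odds[i//2] over the positions, instead of A's stateful single pass scattering into a preallocated array through two striding index counters.
import Mathlib
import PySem

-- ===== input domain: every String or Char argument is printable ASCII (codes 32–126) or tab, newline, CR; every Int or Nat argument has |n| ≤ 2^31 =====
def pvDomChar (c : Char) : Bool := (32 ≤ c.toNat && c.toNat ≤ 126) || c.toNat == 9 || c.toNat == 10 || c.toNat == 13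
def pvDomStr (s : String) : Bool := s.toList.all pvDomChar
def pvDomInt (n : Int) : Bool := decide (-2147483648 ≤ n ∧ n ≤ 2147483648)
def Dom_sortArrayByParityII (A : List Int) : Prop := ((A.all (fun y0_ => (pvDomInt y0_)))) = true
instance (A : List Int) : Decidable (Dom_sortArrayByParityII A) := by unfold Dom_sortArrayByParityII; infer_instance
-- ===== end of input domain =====

-- B replaces A's single stateful pass scattering into a preallocated array through two
-- striding index counters by two filter passes (evens, odds) and one comprehension that
-- reads evens[i//2] / odds[i//2] at each position: a simpler, different decomposition.

-- ===== PORT A =====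
-- Indices even/odd are nonnegative counters; under Pre_ every write res[i] = a is in
-- range, where List.set is exact for Python's list assignment.
def sortArrayByParityII (A : List Int) : List Int :=
  (A.foldl (fun (st : List Int × Nat × Nat) a =>
      if PySem.Int.mod a 2 == 1 then (st.1.set st.2.2 a, st.2.1, st.2.2 + 2)
      else (st.1.set st.2.1 a, st.2.1 + 2, st.2.2))
    (List.replicate A.length (0 : Int), 0, 1)).1

-- ===== PORT B =====
def sortArrayByParityII_alt (A : List Int) : List Int :=
  let evens := A.filter (fun x => PySem.Int.mod x 2 == 0)
  let odds := A.filter (fun x => PySem.Int.mod x 2 == 1)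
  (PySem.List.pyRange 0 (PySem.List.len A) 1).map (fun i =>
    if PySem.Int.mod i 2 == 0 then PySem.List.pyGetD evens (PySem.Int.floordiv i 2) 0
    else PySem.List.pyGetD odds (PySem.Int.floordiv i 2) 0)

-- ===== PRECONDITION & SPEC =====
-- Pre_ excludes exactly the inputs on which both Pythons raise IndexError: those with more
-- odd elements than odd slots (2*#odds > n) or more even elements than even slots (2*#evens > n+1).
def Pre_sortArrayByParityII (A : List Int) : Prop :=
  2 * (A.filter (fun x => PySem.Int.mod x 2 == 1)).length ≤ A.length ∧
  2 * (A.filter (fun x => PySem.Int.mod x 2 == 0)).length ≤ A.length + 1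
instance (A : List Int) : Decidable (Pre_sortArrayByParityII A) := by
  unfold Pre_sortArrayByParityII; infer_instance

def pvWitness_sortArrayByParityII : List Int := [4, 7, 2, 3]

def Spec_sortArrayByParityII (A : List Int) (out : List Int) : Prop := out = sortArrayByParityII_alt A
instance (A : List Int) (out : List Int) : Decidable (Spec_sortArrayByParityII A out) := by unfold Spec_sortArrayByParityII; infer_instance

-- ===== CLAIM (what is proved, stated in full; the proofs are below) =====
def Claim_equal_sortArrayByParityII : Prop := ∀ (A : List Int), Dom_sortArrayByParityII A → Pre_sortArrayByParityII A → Spec_sortArrayByParityII A (sortArrayByParityII A)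

-- ===== LEMMAS AND PROOFS =====

-- write xs at positions i, i+2, i+4, …
def pvPlace (r : List Int) (i : Nat) (xs : List Int) : List Int :=
  match xs with
  | [] => r
  | x :: xs => pvPlace (r.set i x) (i + 2) xs

-- the interleaving both programs compute
def pvIl : List Int → List Int → List Int
  | [], _ => []
  | e :: _, [] => [e]
  | e :: E, o :: O => e :: o :: pvIl E O

theorem pvSet_place_comm (xs : List Int) : ∀ (r : List Int) (i o : Nat) (x : Int),
    i % 2 ≠ o % 2 → pvPlace (r.set i x) o xs = (pvPlace r o xs).set i x := by
  induction xs with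
  | nil => intro r i o x _; rfl
  | cons y ys ih =>
      intro r i o x h
      simp only [pvPlace]
      rw [List.set_comm _ _ (by omega), ih _ i (o + 2) x (by omega)]

theorem pvShift (xs : List Int) : ∀ (r : List Int) (x : Int) (i : Nat),
    pvPlace (x :: r) (i + 1) xs = x :: pvPlace r i xs := by
  induction xs with
  | nil => intro r x i; rfl
  | cons y ys ih =>
      intro r x i
      simp only [pvPlace, List.set_cons_succ]
      exact ih (r.set i y) x (i + 2)

theorem pvMod_two_cases (a : Int) :
    PySem.Int.mod a 2 = 0 ∨ PySem.Int.mod a 2 = 1 := by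
  have h1 := PySem.Int.mod_nonneg a (b := 2) (by omega)
  have h2 := PySem.Int.mod_lt a (b := 2) (by omega)
  omega

theorem pvFold_eq (L : List Int) : ∀ (r : List Int) (e o : Nat), e % 2 ≠ o % 2 →
    (L.foldl (fun (st : List Int × Nat × Nat) a =>
      if PySem.Int.mod a 2 == 1 then (st.1.set st.2.2 a, st.2.1, st.2.2 + 2)
      else (st.1.set st.2.1 a, st.2.1 + 2, st.2.2)) (r, e, o)).1
    = pvPlace (pvPlace r o (L.filter (fun x => PySem.Int.mod x 2 == 1))) e
        (L.filter (fun x => PySem.Int.mod x 2 == 0)) := by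
  induction L with
  | nil => intro r e o _; rfl
  | cons a L ih =>
      intro r e o h
      rcases pvMod_two_cases a with ha | ha
      · have hc1 : (PySem.Int.mod a 2 == 1) = false := by rw [ha]; rfl
        have hc0 : (PySem.Int.mod a 2 == 0) = true := by rw [ha]; rfl
        simp only [List.foldl_cons, List.filter_cons, hc1, hc0, Bool.false_eq_true,
          if_false, if_true]
        rw [ih (r.set e a) (e + 2) o (by omega)]
        rw [pvSet_place_comm _ _ e o _ h]
        rfl
      · have hc1 : (PySem.Int.mod a 2 == 1) = true := by rw [ha]; rfl
        have hc0 : (PySem.Int.mod a 2 == 0) = false := by rw [ha]; rfl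
        simp only [List.foldl_cons, List.filter_cons, hc1, hc0, Bool.false_eq_true,
          if_false, if_true]
        rw [ih (r.set o a) e (o + 2) (by omega)]
        rfl

theorem pvPlace_il (E : List Int) : ∀ (O r : List Int),
    O.length ≤ E.length → E.length ≤ O.length + 1 → r.length = E.length + O.length →
    pvPlace (pvPlace r 1 O) 0 E = pvIl E O := by
  induction E with
  | nil =>
      intro O r h1 _ hr
      simp only [List.length_nil] at h1 hr
      have hO : O = [] := List.eq_nil_of_length_eq_zero (by omega)
      subst hO
      have hrn : r = [] := List.eq_nil_of_length_eq_zero (by simpa using hr)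
      subst hrn
      rfl
  | cons e E ih =>
      intro O r h1 h2 hr
      cases O with
      | nil =>
          simp only [List.length_cons, List.length_nil] at h2 hr
          have hE : E = [] := List.eq_nil_of_length_eq_zero (by omega)
          subst hE
          simp only [List.length_nil] at hr
          obtain ⟨x, rfl⟩ := List.length_eq_one_iff.mp (by omega)
          rfl
      | cons o O =>
          obtain ⟨x, y, r, rfl⟩ : ∃ x y r', r = x :: y :: r' := by
            cases r with
            | nil => simp at hr
            | cons x t =>
                cases t with
                | nil => simp at hr; omega
                | cons y r' => exact ⟨x, y, r', rfl⟩
          have hinner : pvPlace (x :: y :: r) 1 (o :: O) = x :: o :: pvPlace r 1 O := by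
            show pvPlace ((x :: y :: r).set 1 o) 3 O = _
            simp only [List.set_cons_succ, List.set_cons_zero]
            rw [show (3 : Nat) = 2 + 1 from rfl, pvShift,
                show (2 : Nat) = 1 + 1 from rfl, pvShift]
          rw [hinner]
          have houter : pvPlace (x :: o :: pvPlace r 1 O) 0 (e :: E)
              = e :: o :: pvPlace (pvPlace r 1 O) 0 E := by
            show pvPlace ((x :: o :: pvPlace r 1 O).set 0 e) 2 E = _
            simp only [List.set_cons_zero]
            rw [show (2 : Nat) = 1 + 1 from rfl, pvShift,
                show (1 : Nat) = 0 + 1 from rfl, pvShift]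
          rw [houter]
          simp only [List.length_cons] at hr h1 h2
          rw [ih O r (by omega) (by omega) (by omega)]
          rfl

theorem pvRange_two (m : Nat) :
    List.range (m + 2) = 0 :: 1 :: (List.range m).map (fun k => k + 2) := by
  rw [show m + 2 = (m + 1) + 1 from rfl, List.range_succ_eq_map, List.range_succ_eq_map]
  simp only [List.map_cons, List.map_map]
  refine congrArg _ (congrArg _ (List.map_congr_left fun k _ => ?_))
  simp [Function.comp]

theorem pvRangeMap_il (E : List Int) : ∀ O : List Int,
    O.length ≤ E.length → E.length ≤ O.length + 1 →
    (List.range (E.length + O.length)).map (fun k =>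
      if k % 2 == 0 then E.getD (k / 2) 0 else O.getD (k / 2) 0) = pvIl E O := by
  induction E with
  | nil =>
      intro O h1 _
      simp only [List.length_nil] at h1
      have hO : O = [] := List.eq_nil_of_length_eq_zero (by omega)
      subst hO
      rfl
  | cons e E ih =>
      intro O h1 h2
      cases O with
      | nil =>
          simp only [List.length_cons, List.length_nil] at h2
          have hE : E = [] := List.eq_nil_of_length_eq_zero (by omega)
          subst hE
          rfl
      | cons o O =>
          have hlen : (e :: E).length + (o :: O).length = (E.length + O.length) + 2 := by
            simp only [List.length_cons]; omega
          rw [hlen, pvRange_two, List.map_cons, List.map_cons, List.map_map]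
          have hmap : (List.range (E.length + O.length)).map
                ((fun k => if k % 2 == 0 then (e :: E).getD (k / 2) 0
                           else (o :: O).getD (k / 2) 0) ∘ (fun k => k + 2))
              = (List.range (E.length + O.length)).map (fun k =>
                  if k % 2 == 0 then E.getD (k / 2) 0 else O.getD (k / 2) 0) := by
            refine List.map_congr_left fun k _ => ?_
            have hm : (k + 2) % 2 = k % 2 := Nat.add_mod_right k 2
            have hd : (k + 2) / 2 = k / 2 + 1 := by omega
            simp only [Function.comp, hm, hd, List.getD_cons_succ]
          rw [hmap, ih O (by simpa using h1) (by simpa using h2)]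
          rfl

theorem pvFilter_partition (A : List Int) :
    (A.filter (fun x => PySem.Int.mod x 2 == 0)).length
      + (A.filter (fun x => PySem.Int.mod x 2 == 1)).length = A.length := by
  induction A with
  | nil => rfl
  | cons a L ih =>
      rcases pvMod_two_cases a with ha | ha
      · have hc1 : (PySem.Int.mod a 2 == 1) = false := by rw [ha]; rfl
        have hc0 : (PySem.Int.mod a 2 == 0) = true := by rw [ha]; rfl
        simp only [List.filter_cons, hc1, hc0, Bool.false_eq_true, if_false, if_true,
          List.length_cons]
        omega
      · have hc1 : (PySem.Int.mod a 2 == 1) = true := by rw [ha]; rfl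
        have hc0 : (PySem.Int.mod a 2 == 0) = false := by rw [ha]; rfl
        simp only [List.filter_cons, hc1, hc0, Bool.false_eq_true, if_false, if_true,
          List.length_cons]
        omega

-- ===== VERDICT (by name: the statement is the Claim_ definition above) =====
theorem sortArrayByParityII_spec : Claim_equal_sortArrayByParityII := by
  unfold Claim_equal_sortArrayByParityII
  intro A _ hPre
  unfold Spec_sortArrayByParityII
  obtain ⟨h1, h2⟩ := hPre
  have hpart := pvFilter_partition A
  set E := A.filter (fun x => PySem.Int.mod x 2 == 0) with hE
  set O := A.filter (fun x => PySem.Int.mod x 2 == 1) with hO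
  have hOE : O.length ≤ E.length := by omega
  have hEO : E.length ≤ O.length + 1 := by omega
  have hA : sortArrayByParityII A = pvIl E O := by
    unfold sortArrayByParityII
    rw [pvFold_eq A (List.replicate A.length 0) 0 1 (by omega)]
    rw [← hE, ← hO]
    exact pvPlace_il E O _ hOE hEO (by simp only [List.length_replicate]; omega)
  have hB : sortArrayByParityII_alt A = pvIl E O := by
    unfold sortArrayByParityII_alt
    rw [← hE, ← hO, PySem.List.len_eq, PySem.List.pyRange_zero_natCast, List.map_map]
    have hmap : (List.range A.length).map
          ((fun i => if PySem.Int.mod i 2 == 0 then PySem.List.pyGetD E (PySem.Int.floordiv i 2) 0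
                     else PySem.List.pyGetD O (PySem.Int.floordiv i 2) 0) ∘ (fun k : Nat => (k : Int)))
        = (List.range A.length).map (fun k =>
            if k % 2 == 0 then E.getD (k / 2) 0 else O.getD (k / 2) 0) := by
      refine List.map_congr_left fun k _ => ?_
      have h2' : ((2 : Nat) : Int) = 2 := by norm_num
      simp only [Function.comp, ← h2', PySem.Int.mod_natCast, PySem.Int.floordiv_natCast,
        PySem.List.pyGetD_natCast]
      rcases Nat.mod_two_eq_zero_or_one k with hk | hk <;> simp [hk]
    rw [hmap, ← hpart]
    exact pvRangeMap_il E O hOE hEO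
  rw [hA, hB]
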